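-- pv_equiv track=rewrite | github.com/Stephanehk/PromptPO | env_utils/noise_world_board_layout.py | _cells_reachable_from_start
-- ===== SOURCE A (Python) =====
-- from collections import deque
--
-- def _cells_reachable_from_start(n, start, walls):
--     """
--     All cells reachable from ``start`` by 4-neighbor moves through non-wall cells.
--
--     Assumptions:
--     - start is inside the grid; walls block movement only.
--     """
--     seen = {start}
--     q = deque([start])
--     while q:
--         r, c = q.popleft()
--         for dr, dc in ((-1, 0), (1, 0), (0, -1), (0, 1)):
--             nr, nc = r + dr, c + dc
--             if nr < 0 or nr >= n or nc < 0 or nc >= n: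
--                 continue
--             if (nr, nc) in walls:
--                 continue
--             if (nr, nc) in seen:
--                 continue
--             seen.add((nr, nc))
--             q.append((nr, nc))
--     return seen
-- ===== SOURCE B (Python) =====
-- def _cells_reachable_from_start(n, start, walls):
--     """
--     Same reachable set, but computed layer-recursively: a helper consumes one whole
--     breadth layer per call and recurses on the newly discovered layer (no queue
--     object, no popping); the wall collection is hashed once up front.
--     """
--     blocked = set(walls)
--
--     def grow(seen, frontier):
--         if not frontier:
--             return seen
--         nxt = []
--         for r, c in frontier:
--             for cell in ((r - 1, c), (r + 1, c), (r, c - 1), (r, c + 1)):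
--                 if 0 <= cell[0] < n and 0 <= cell[1] < n \
--                         and cell not in blocked and cell not in seen:
--                     seen.add(cell)
--                     nxt.append(cell)
--         return grow(seen, nxt)
--
--     return grow({start}, [start])
-- ===== Notes on version B (the rewrite author's own statement) =====
-- stated objective: alternative
-- what changed: Replaced the deque-based cell-at-a-time worklist by a recursive layer-at-a-time decomposition: a helper expands one whole breadth layer per call and recurses on the newly discovered layer (no queue object, no popping), with the wall collection hashed into a set once up front; the traversal keeps A's exact discovery order, which the returned set's construction depends on.
import Mathlib
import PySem

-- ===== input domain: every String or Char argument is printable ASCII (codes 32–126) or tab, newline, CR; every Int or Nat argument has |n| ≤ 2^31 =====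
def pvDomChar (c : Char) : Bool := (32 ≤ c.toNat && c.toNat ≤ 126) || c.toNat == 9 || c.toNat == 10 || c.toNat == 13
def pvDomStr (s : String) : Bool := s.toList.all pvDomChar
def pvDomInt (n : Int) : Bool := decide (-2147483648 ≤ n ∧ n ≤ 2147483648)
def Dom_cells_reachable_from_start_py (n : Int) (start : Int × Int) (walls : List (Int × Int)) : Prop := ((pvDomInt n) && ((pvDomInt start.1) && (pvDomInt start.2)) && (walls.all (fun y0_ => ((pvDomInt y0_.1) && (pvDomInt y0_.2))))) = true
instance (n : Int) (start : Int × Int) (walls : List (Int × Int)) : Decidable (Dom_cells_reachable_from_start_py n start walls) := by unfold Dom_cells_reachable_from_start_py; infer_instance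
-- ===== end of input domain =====

-- B replaces A's deque worklist by a recursive layer-at-a-time decomposition (one call
-- consumes a whole breadth layer and recurses on the newly found one; walls hashed once);
-- same returned set, proved equal on all inputs (objective: alternative decomposition).

-- grid cells as a Finset; used only in termination measures and proofs
def pvGridSide (n : Int) : Finset Int := (Finset.range n.toNat).image (fun i : Nat => (i : Int))
def pvGrid (n : Int) : Finset (Int × Int) := pvGridSide n ×ˢ pvGridSide n

theorem pvGridSide_mem (n : Int) (x : Int) : x ∈ pvGridSide n ↔ 0 ≤ x ∧ x < n := by
  rw [pvGridSide, Finset.mem_image]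
  constructor
  · rintro ⟨i, hi, rfl⟩
    rw [Finset.mem_range] at hi
    omega
  · intro h
    exact ⟨x.toNat, Finset.mem_range.mpr (by omega), by omega⟩

theorem pvGrid_mem (n : Int) (y : Int × Int) :
    y ∈ pvGrid n ↔ 0 ≤ y.1 ∧ y.1 < n ∧ 0 ≤ y.2 ∧ y.2 < n := by
  rw [pvGrid, Finset.mem_product, pvGridSide_mem, pvGridSide_mem]
  tauto

-- the fold lemmas the termination proofs cite (growth of seen, or exact state preservation)
theorem pvFoldGrow {α δ : Type} (G : Finset α)
    (g : (List α × List α) → δ → (List α × List α))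
    (Hg : ∀ st d, g st d = st ∨
      (st.1 ⊆ (g st d).1 ∧ ∃ y, y ∈ G ∧ y ∉ st.1 ∧ y ∈ (g st d).1)) :
    ∀ (l : List δ) (st : List α × List α), l.foldl g st = st ∨
      (st.1 ⊆ (l.foldl g st).1 ∧ ∃ y, y ∈ G ∧ y ∉ st.1 ∧ y ∈ (l.foldl g st).1) := by
  intro l
  induction l with
  | nil => intro st; left; rfl
  | cons d l ih =>
    intro st
    simp only [List.foldl_cons]
    rcases Hg st d with h | ⟨hsub, y, hyG, hyn, hyi⟩
    · rw [h]; exact ih st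
    · right
      rcases ih (g st d) with h2 | ⟨hsub2, _⟩
      · rw [h2]; exact ⟨hsub, y, hyG, hyn, hyi⟩
      · exact ⟨fun a ha => hsub2 (hsub ha), y, hyG, hyn, hsub2 hyi⟩

theorem pvCardLt {α : Type} [DecidableEq α] (G : Finset α) (s s' : List α)
    (hsub : s ⊆ s') (y : α) (hyG : y ∈ G) (hyn : y ∉ s) (hyi : y ∈ s') :
    (G \ s'.toFinset).card < (G \ s.toFinset).card := by
  apply Finset.card_lt_card
  constructor
  · intro x hx
    simp only [Finset.mem_sdiff, List.mem_toFinset] at hx ⊢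
    exact ⟨hx.1, fun hxs => hx.2 (hsub hxs)⟩
  · intro hcon
    have hy : y ∈ G \ s.toFinset := by
      simp only [Finset.mem_sdiff, List.mem_toFinset]; exact ⟨hyG, hyn⟩
    have := hcon hy
    simp only [Finset.mem_sdiff, List.mem_toFinset] at this
    exact this.2 hyi

-- ===== PORT A =====
-- the body of A's inner `for dr, dc in …` loop: bounds check, wall check, seen check,
-- then seen.add / q.append (the two `++ [p]`; exact, the element was just checked absent)
def pvStepA (n : Int) (walls : List (Int × Int))
    (st : PySem.Set (Int × Int) × List (Int × Int)) (p : Int × Int) :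
    PySem.Set (Int × Int) × List (Int × Int) :=
  if p.1 < 0 ∨ p.1 ≥ n ∨ p.2 < 0 ∨ p.2 ≥ n then st
  else if p ∈ walls then st
  else if p ∈ st.1 then st
  else (st.1 ++ [p], st.2 ++ [p])

-- A's inner loop over the four deltas; state = (seen, q-after-popleft)
def pvScanA (n : Int) (walls : List (Int × Int)) (r c : Int)
    (st : PySem.Set (Int × Int) × List (Int × Int)) :
    PySem.Set (Int × Int) × List (Int × Int) :=
  [((-1 : Int), (0 : Int)), (1, 0), (0, -1), (0, 1)].foldl
    (fun st d => pvStepA n walls st (r + d.1, c + d.2)) st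

theorem pvScanA_grow (n : Int) (walls : List (Int × Int)) (r c : Int)
    (st : PySem.Set (Int × Int) × List (Int × Int)) :
    pvScanA n walls r c st = st ∨
      (st.1 ⊆ (pvScanA n walls r c st).1 ∧
        ∃ y, y ∈ pvGrid n ∧ y ∉ st.1 ∧ y ∈ (pvScanA n walls r c st).1) := by
  apply pvFoldGrow (pvGrid n)
  intro st d
  unfold pvStepA
  split_ifs with h1 h2 h3
  · left; rfl
  · left; rfl
  · left; rfl
  · right
    refine ⟨by simp, (r + d.1, c + d.2), ?_, h3, by simp⟩
    rw [pvGrid_mem]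
    simp only
    omega

-- A's `while q:` loop
def pvBfsA (n : Int) (walls : List (Int × Int))
    (seen : PySem.Set (Int × Int)) (q : List (Int × Int)) : PySem.Set (Int × Int) :=
  match q with
  | [] => seen
  | x :: rest =>
    let st := pvScanA n walls x.1 x.2 (seen, rest)
    pvBfsA n walls st.1 st.2
termination_by ((pvGrid n \ seen.toFinset).card, q.length)
decreasing_by
  rcases pvScanA_grow n walls x.1 x.2 (seen, rest) with h | ⟨hsub, y, hyG, hyn, hyi⟩
  · rw [h]
    exact Prod.Lex.right _ (by simp)
  · exact Prod.Lex.left _ _ (pvCardLt (pvGrid n) seen _ hsub y hyG hyn hyi)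

def cells_reachable_from_start_py (n : Int) (start : Int × Int) (walls : List (Int × Int)) : List (Int × Int) :=
  pvBfsA n walls [start] [start]

-- ===== PORT B =====
-- body of B's inner `for cell in …` loop: one merged bounds/blocked/seen test, then
-- seen.add(cell) / nxt.append(cell) (the two `++ [p]`; exact, cell was checked absent)
def pvCellB (n : Int) (blocked : PySem.Set (Int × Int))
    (st : PySem.Set (Int × Int) × List (Int × Int)) (cell : Int × Int) :
    PySem.Set (Int × Int) × List (Int × Int) :=
  [(cell.1 - 1, cell.2), (cell.1 + 1, cell.2), (cell.1, cell.2 - 1), (cell.1, cell.2 + 1)].foldl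
    (fun st p =>
      if (0 ≤ p.1 ∧ p.1 < n ∧ 0 ≤ p.2 ∧ p.2 < n) ∧ ¬ blocked.contains p = true ∧ p ∉ st.1
      then (st.1 ++ [p], st.2 ++ [p]) else st) st

-- B's `for r, c in frontier` loop; state = (seen, nxt)
def pvLayerB (n : Int) (blocked : PySem.Set (Int × Int))
    (seen : PySem.Set (Int × Int)) (frontier : List (Int × Int)) :
    PySem.Set (Int × Int) × List (Int × Int) :=
  frontier.foldl (pvCellB n blocked) (seen, [])

theorem pvCellB_grow (n : Int) (blocked : PySem.Set (Int × Int))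
    (st : PySem.Set (Int × Int) × List (Int × Int)) (cell : Int × Int) :
    pvCellB n blocked st cell = st ∨
      (st.1 ⊆ (pvCellB n blocked st cell).1 ∧
        ∃ y, y ∈ pvGrid n ∧ y ∉ st.1 ∧ y ∈ (pvCellB n blocked st cell).1) := by
  apply pvFoldGrow (pvGrid n)
  intro st p
  beta_reduce
  split_ifs with h
  · right
    refine ⟨by simp, p, ?_, h.2.2, by simp⟩
    rw [pvGrid_mem]
    have := h.1
    omega
  · left; rfl

theorem pvLayerB_grow (n : Int) (blocked : PySem.Set (Int × Int))
    (seen : PySem.Set (Int × Int)) (frontier : List (Int × Int)) :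
    pvLayerB n blocked seen frontier = (seen, []) ∨
      (seen ⊆ (pvLayerB n blocked seen frontier).1 ∧
        ∃ y, y ∈ pvGrid n ∧ y ∉ seen ∧ y ∈ (pvLayerB n blocked seen frontier).1) :=
  pvFoldGrow (pvGrid n) (pvCellB n blocked) (pvCellB_grow n blocked) frontier (seen, [])

-- B's recursive helper `grow(seen, frontier)`
def pvGrowB (n : Int) (blocked : PySem.Set (Int × Int))
    (seen : PySem.Set (Int × Int)) (frontier : List (Int × Int)) : PySem.Set (Int × Int) :=
  match frontier with
  | [] => seen
  | _ :: _ =>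
    let st := pvLayerB n blocked seen frontier
    pvGrowB n blocked st.1 st.2
termination_by ((pvGrid n \ seen.toFinset).card, frontier.length)
decreasing_by
  rcases pvLayerB_grow n blocked seen frontier with h | ⟨hsub, y, hyG, hyn, hyi⟩
  · rw [h]
    exact Prod.Lex.right _ (by simp)
  · exact Prod.Lex.left _ _ (pvCardLt (pvGrid n) seen _ hsub y hyG hyn hyi)

def cells_reachable_from_start_py_alt (n : Int) (start : Int × Int) (walls : List (Int × Int)) : List (Int × Int) :=
  pvGrowB n (PySem.Set.ofList walls) [start] [start]

-- ===== PRECONDITION & SPEC =====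
def Spec_cells_reachable_from_start_py (n : Int) (start : Int × Int) (walls : List (Int × Int)) (out : List (Int × Int)) : Prop := out = cells_reachable_from_start_py_alt n start walls
instance (n : Int) (start : Int × Int) (walls : List (Int × Int)) (out : List (Int × Int)) : Decidable (Spec_cells_reachable_from_start_py n start walls out) := by unfold Spec_cells_reachable_from_start_py; infer_instance

-- ===== CLAIM (what is proved, stated in full; the proofs are below) =====
def Claim_equal_cells_reachable_from_start_py : Prop := ∀ (n : Int) (start : Int × Int) (walls : List (Int × Int)), Dom_cells_reachable_from_start_py n start walls → Spec_cells_reachable_from_start_py n start walls (cells_reachable_from_start_py n start walls)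

-- ===== LEMMAS AND PROOFS =====

-- A's per-neighbor step at cell p equals B's per-neighbor step at p (with walls hashed)
theorem pvStep_eq (n : Int) (walls : List (Int × Int))
    (st : PySem.Set (Int × Int) × List (Int × Int)) (p : Int × Int) :
    pvStepA n walls st p
    = (if (0 ≤ p.1 ∧ p.1 < n ∧ 0 ≤ p.2 ∧ p.2 < n) ∧
          ¬ (PySem.Set.ofList walls).contains p = true ∧ p ∉ st.1
       then (st.1 ++ [p], st.2 ++ [p]) else st) := by
  have hw : (PySem.Set.ofList walls).contains p = true ↔ p ∈ walls := by
    simp [PySem.Set.contains, PySem.Set.mem_ofList]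
  unfold pvStepA
  have hc : ((0 ≤ p.1 ∧ p.1 < n ∧ 0 ≤ p.2 ∧ p.2 < n) ∧
      ¬ (PySem.Set.ofList walls).contains p = true ∧ p ∉ st.1) ↔
      (¬(p.1 < 0 ∨ p.1 ≥ n ∨ p.2 < 0 ∨ p.2 ≥ n) ∧ p ∉ walls ∧ p ∉ st.1) := by
    rw [hw]
    constructor <;> intro h <;> exact ⟨by omega, h.2⟩
  split_ifs with h1 h2 h3 h4 <;> first | rfl | (exfalso; rw [hc] at *; tauto)

-- A's neighbor scan of one popped cell IS B's per-cell step
theorem pvScanA_eq_cellB (n : Int) (walls : List (Int × Int)) (r c : Int)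
    (st : PySem.Set (Int × Int) × List (Int × Int)) :
    pvScanA n walls r c st = pvCellB n (PySem.Set.ofList walls) st (r, c) := by
  have e1 : r + (-1 : Int) = r - 1 := by ring
  have e4 : c + (-1 : Int) = c - 1 := by ring
  simp only [pvScanA, pvCellB, List.foldl_cons, List.foldl_nil]
  simp only [e1, e4, add_zero]
  rw [pvStep_eq n walls st (r - 1, c)]
  rw [pvStep_eq (n := n) (walls := walls) (p := (r + 1, c))]
  rw [pvStep_eq (n := n) (walls := walls) (p := (r, c - 1))]
  rw [pvStep_eq (n := n) (walls := walls) (p := (r, c + 1))]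

-- a step that only reads st.1 and appends the same items to both components
-- commutes with any accumulator contents in st.2; closed under folding
theorem pvFoldAcc {α δ : Type}
    (g : (List α × List α) → δ → (List α × List α))
    (Hg : ∀ (st : List α × List α) (d : δ),
      g st d = ((g (st.1, []) d).1, st.2 ++ (g (st.1, []) d).2)) :
    ∀ (l : List δ) (st : List α × List α),
      l.foldl g st = ((l.foldl g (st.1, [])).1, st.2 ++ (l.foldl g (st.1, [])).2) := by
  intro l
  induction l with
  | nil => intro st; simp
  | cons d l ih =>
    intro st
    simp only [List.foldl_cons]
    rw [Hg st d, ih ((g (st.1, []) d).1, st.2 ++ (g (st.1, []) d).2),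
        ih (g (st.1, []) d)]
    simp [List.append_assoc]

theorem pvCellB_acc (n : Int) (blocked : PySem.Set (Int × Int)) :
    ∀ (st : PySem.Set (Int × Int) × List (Int × Int)) (cell : Int × Int),
      pvCellB n blocked st cell =
        ((pvCellB n blocked (st.1, []) cell).1, st.2 ++ (pvCellB n blocked (st.1, []) cell).2) := by
  intro st cell
  apply pvFoldAcc
  intro st p
  beta_reduce
  split_ifs <;> simp_all

theorem pvLayerB_acc (n : Int) (blocked : PySem.Set (Int × Int))
    (f : List (Int × Int)) (st : PySem.Set (Int × Int) × List (Int × Int)) :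
    f.foldl (pvCellB n blocked) st =
      ((pvLayerB n blocked st.1 f).1, st.2 ++ (pvLayerB n blocked st.1 f).2) :=
  pvFoldAcc (pvCellB n blocked) (pvCellB_acc n blocked) f st

-- queue decomposition: running A's BFS on f ++ g first consumes f, producing exactly
-- one layer round of B (seen update + the newly discovered cells appended after g)
theorem pvBfs_decomp (n : Int) (walls : List (Int × Int)) :
    ∀ (f g : List (Int × Int)) (s : PySem.Set (Int × Int)),
      pvBfsA n walls s (f ++ g) =
        pvBfsA n walls (pvLayerB n (PySem.Set.ofList walls) s f).1
          (g ++ (pvLayerB n (PySem.Set.ofList walls) s f).2) := by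
  intro f
  induction f with
  | nil => intro g s; simp [pvLayerB]
  | cons x f ih =>
    intro g s
    have hx : pvBfsA n walls s (x :: (f ++ g)) =
        pvBfsA n walls (pvScanA n walls x.1 x.2 (s, f ++ g)).1
          (pvScanA n walls x.1 x.2 (s, f ++ g)).2 := by
      rw [pvBfsA]
    have hl : pvLayerB n (PySem.Set.ofList walls) s (x :: f) =
        ((pvLayerB n (PySem.Set.ofList walls)
            (pvCellB n (PySem.Set.ofList walls) (s, []) x).1 f).1,
          (pvCellB n (PySem.Set.ofList walls) (s, []) x).2 ++
            (pvLayerB n (PySem.Set.ofList walls)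
              (pvCellB n (PySem.Set.ofList walls) (s, []) x).1 f).2) := by
      simp only [pvLayerB, List.foldl_cons]
      exact pvLayerB_acc n (PySem.Set.ofList walls) f
        (pvCellB n (PySem.Set.ofList walls) (s, []) x)
    rw [List.cons_append, hx, pvScanA_eq_cellB,
        pvCellB_acc n (PySem.Set.ofList walls) (s, f ++ g) x]
    dsimp only
    rw [List.append_assoc,
        ih (g ++ (pvCellB n (PySem.Set.ofList walls) (s, []) x).2)
          (pvCellB n (PySem.Set.ofList walls) (s, []) x).1,
        hl]
    dsimp only
    rw [List.append_assoc]

-- A's BFS equals B's layer recursion on every state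
theorem pvBfsA_eq_growB (n : Int) (walls : List (Int × Int)) :
    ∀ (seen : PySem.Set (Int × Int)) (frontier : List (Int × Int)),
      pvBfsA n walls seen frontier = pvGrowB n (PySem.Set.ofList walls) seen frontier := by
  intro seen frontier
  induction seen, frontier using pvGrowB.induct n (PySem.Set.ofList walls) with
  | case1 seen => rw [pvBfsA, pvGrowB]
  | case2 seen x f st ih =>
    rw [pvGrowB]
    have h := pvBfs_decomp n walls (x :: f) [] seen
    simp only [List.append_nil, List.nil_append] at h
    exact h.trans ih

-- ===== VERDICT (by name: the statement is the Claim_ definition above) =====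
theorem cells_reachable_from_start_py_spec : Claim_equal_cells_reachable_from_start_py := by
  intro n start walls _
  unfold Spec_cells_reachable_from_start_py cells_reachable_from_start_py
    cells_reachable_from_start_py_alt
  exact pvBfsA_eq_growB n walls [start] [start]
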